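-- pv_equiv track=rewrite | github.com/mfaishalif/binger-lama | main.py | hitung_modus
-- ===== SOURCE A (Python) =====
-- def hitung_modus(data):
--     """Menghitung modus dari data.
--        Jika terdapat lebih dari satu modus, dipilih nilai modus terkecil."""
--     frekuensi = {}
--     for nilai in data:
--         if nilai in frekuensi:
--             frekuensi[nilai] += 1
--         else:
--             frekuensi[nilai] = 1
--
--     # Cari frekuensi maksimum
--     max_frek = 0
--     for frek in frekuensi.values():
--         if frek > max_frek:
--             max_frek = frek
--
--     # Ambil semua nilai yang frekuensinya sama dengan nilai maksimum
--     modus_list = []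
--     for nilai, frek in frekuensi.items():
--         if frek == max_frek:
--             modus_list.append(nilai)
--
--     # Jika terdapat lebih dari satu modus, pilih yang terkecil
--     return min(modus_list)
-- ===== SOURCE B (Python) =====
-- def hitung_modus(data):
--     """Menghitung modus dari data dalam satu lintasan;
--        pada seri frekuensi dipilih nilai terkecil."""
--     frekuensi = {}
--     best = None
--     best_frek = 0
--     for nilai in data:
--         f = frekuensi.get(nilai, 0) + 1
--         frekuensi[nilai] = f
--         if f > best_frek:
--             best, best_frek = nilai, f
--         elif f == best_frek and nilai < best:
--             best = nilai
--     if best is None: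
--         raise ValueError("data kosong")
--     return best
-- ===== Notes on version B (the rewrite author's own statement) =====
-- stated objective: alternative
-- what changed: Replaces A's three separate passes (build a frequency dict, scan it for the maximum, collect all tied values, take min) by a single streaming pass that maintains the running mode online, updating it on a strictly higher count or on an equal count with a smaller value.
import Mathlib
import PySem

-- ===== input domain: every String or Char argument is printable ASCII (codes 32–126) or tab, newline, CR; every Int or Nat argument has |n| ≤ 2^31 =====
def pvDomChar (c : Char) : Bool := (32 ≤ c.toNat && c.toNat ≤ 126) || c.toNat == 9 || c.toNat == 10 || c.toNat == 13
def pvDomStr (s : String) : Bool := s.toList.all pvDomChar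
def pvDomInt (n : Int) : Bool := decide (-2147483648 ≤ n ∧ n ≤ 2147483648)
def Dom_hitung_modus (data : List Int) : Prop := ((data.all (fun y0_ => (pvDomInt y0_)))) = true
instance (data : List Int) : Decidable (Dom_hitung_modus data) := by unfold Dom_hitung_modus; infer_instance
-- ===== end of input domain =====

-- B replaces A's three separate passes (count dict, max scan, collect + min) by one streaming pass
-- that maintains the running mode with a smaller-value tie-break; objective: alternative (same O(n) cost).

-- ===== PORT A =====
def hitung_modus (data : List Int) : Int :=
  let frekuensi : PySem.Dict Int Int := data.foldl
    (fun d nilai =>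
      if d.contains nilai then d.insert nilai (d.getD nilai 0 + 1)
      else d.insert nilai 1)
    PySem.Dict.empty
  let maxFrek := frekuensi.values.foldl (fun m f => if f > m then f else m) 0
  let modusList := frekuensi.items.foldl
    (fun acc p => if p.2 = maxFrek then acc ++ [p.1] else acc) []
  ((PySem.List.min? modusList (fun x => x)).getD 0)   -- min([]) raises ValueError: excluded by Pre_

-- ===== PORT B =====
-- loop body of B: state (frekuensi, best, best_frek)
def hmAltStep : (PySem.Dict Int Int × Option Int × Int) → Int → (PySem.Dict Int Int × Option Int × Int)
  | (frekuensi, best, bestFrek), nilai =>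
    let f := frekuensi.getD nilai 0 + 1
    let frekuensi' := frekuensi.insert nilai f
    if f > bestFrek then (frekuensi', some nilai, f)
    else match best with
      | some b => if f = bestFrek ∧ nilai < b then (frekuensi', some nilai, bestFrek)
                  else (frekuensi', best, bestFrek)
      | none => (frekuensi', best, bestFrek)   -- Python's 'f == best_frek and nilai < best' short-circuits: best None only while best_frek = 0 < f

def hitung_modus_alt (data : List Int) : Int :=
  ((data.foldl hmAltStep (PySem.Dict.empty, none, 0)).2.1.getD 0)   -- best is None only for empty data, where B raises ValueError: excluded by Pre_

-- ===== PRECONDITION & SPEC =====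
-- A raises ValueError on the empty list (min of an empty sequence); B raises ValueError there too.
def Pre_hitung_modus (data : List Int) : Prop := data ≠ []
instance (data : List Int) : Decidable (Pre_hitung_modus data) := by unfold Pre_hitung_modus; infer_instance
def pvWitness_hitung_modus : List Int := [3, 1, 1, 3, 2]

def Spec_hitung_modus (data : List Int) (out : Int) : Prop := out = hitung_modus_alt data
instance (data : List Int) (out : Int) : Decidable (Spec_hitung_modus data out) := by unfold Spec_hitung_modus; infer_instance

-- ===== CLAIM (what is proved, stated in full; the proofs are below) =====
def Claim_equal_hitung_modus : Prop := ∀ (data : List Int), Dom_hitung_modus data → Pre_hitung_modus data → Spec_hitung_modus data (hitung_modus data)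

-- ===== LEMMAS AND PROOFS =====

-- A's counting loop builds Counter(data)
lemma hm_fold_eq_counter (data : List Int) :
    data.foldl
      (fun d nilai =>
        if d.contains nilai then d.insert nilai (d.getD nilai 0 + 1)
        else d.insert nilai 1)
      PySem.Dict.empty = PySem.Dict.counter data := by
  have hfun : (fun (d : PySem.Dict Int Int) nilai =>
      if d.contains nilai then d.insert nilai (d.getD nilai 0 + 1)
      else d.insert nilai 1)
      = (fun (d : PySem.Dict Int Int) x => d.insert x (d.getD x 0 + 1)) := by
    funext d x
    by_cases h : d.contains x
    · simp [h]
    · have hf : d.contains x = false := by simpa using h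
      rw [PySem.Dict.getD_of_not_contains d _ hf]
      simp [hf]
  rw [hfun, PySem.Dict.foldl_insert_getD_add_one_eq_counter]

-- A's running-max step is max
lemma hm_ifmax_eq_max :
    (fun (m f : Int) => if f > m then f else m) = max := by
  funext m f
  simp only [max_def]
  split_ifs with h1 h2 h2 <;> omega

-- invariant of B's streaming loop over the processed prefix p
def hmInv (p : List Int) (st : PySem.Dict Int Int × Option Int × Int) : Prop :=
  st.1 = PySem.Dict.counter p ∧
  (∀ x ∈ p, (p.count x : Int) ≤ st.2.2) ∧
  (match st.2.1 with
   | none => p = [] ∧ st.2.2 = 0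
   | some b => b ∈ p ∧ (p.count b : Int) = st.2.2 ∧ ∀ x ∈ p, (p.count x : Int) = st.2.2 → b ≤ x)

lemma hm_count_append (p : List Int) (v x : Int) :
    ((p ++ [v]).count x : Int) = (p.count x : Int) + if v = x then 1 else 0 := by
  rw [List.count_append, List.count_singleton]
  split_ifs with h <;> simp_all

lemma hmInv_step (p : List Int) (st : PySem.Dict Int Int × Option Int × Int) (v : Int)
    (h : hmInv p st) : hmInv (p ++ [v]) (hmAltStep st v) := by
  obtain ⟨d, b, bf⟩ := st
  obtain ⟨hd, hub, hbest⟩ := h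
  simp only at hd hub hbest
  have hget : d.getD v 0 = (p.count v : Int) := by
    rw [hd]; exact PySem.Dict.getD_counter p v
  have hdic : d.insert v ((p.count v : Int) + 1) = PySem.Dict.counter (p ++ [v]) := by
    rw [← hget, PySem.Dict.counter_append_singleton, hd]; rfl
  have hmemv : v ∈ p ++ [v] := List.mem_append.mpr (Or.inr (by simp))
  simp only [hmAltStep, hget]
  by_cases h1 : (p.count v : Int) + 1 > bf
  · simp only [if_pos h1]
    refine ⟨hdic, ?_, ?_⟩
    · intro x hx
      simp only
      rw [hm_count_append]
      rcases List.mem_append.mp hx with h | h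
      · have := hub x h; split_ifs <;> omega
      · simp at h; subst h; rw [if_pos rfl]
    · simp only
      refine ⟨hmemv, by rw [hm_count_append, if_pos rfl], ?_⟩
      intro x hx hcx
      rw [hm_count_append] at hcx
      by_cases hxv : v = x
      · omega
      · exfalso
        rw [if_neg hxv] at hcx
        rcases List.mem_append.mp hx with h | h
        · have := hub x h; omega
        · simp at h; exact hxv (Eq.symm h)
  · simp only [if_neg h1]
    cases b with
    | none =>
      obtain ⟨hp, hbf⟩ := hbest
      exfalso
      subst hp
      simp at hget
      omega
    | some w =>
      obtain ⟨hwmem, hwcnt, hwmin⟩ := hbest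
      have hwv : w ≠ v := by
        intro h; subst h; omega
      have hcw : ((p ++ [v]).count w : Int) = bf := by
        rw [hm_count_append, if_neg (Ne.symm hwv)]; exact hwcnt
      have hubp : ∀ x ∈ p ++ [v], ((p ++ [v]).count x : Int) ≤ bf := by
        intro x hx
        rw [hm_count_append]
        by_cases hxv : v = x
        · subst hxv; rw [if_pos rfl]; omega
        · rw [if_neg hxv]
          rcases List.mem_append.mp hx with h | h
          · have := hub x h; omega
          · simp at h; exact absurd (Eq.symm h) hxv
      by_cases h2 : (p.count v : Int) + 1 = bf ∧ v < w
      · simp only [if_pos h2]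
        refine ⟨hdic, hubp, ?_⟩
        simp only
        refine ⟨hmemv, by rw [hm_count_append, if_pos rfl]; omega, ?_⟩
        intro x hx hcx
        rw [hm_count_append] at hcx
        by_cases hxv : v = x
        · omega
        · rw [if_neg hxv] at hcx
          rcases List.mem_append.mp hx with h | h
          · exact le_of_lt (lt_of_lt_of_le h2.2 (hwmin x h (by omega)))
          · simp at h; exact absurd (Eq.symm h) hxv
      · simp only [if_neg h2]
        refine ⟨hdic, hubp, ?_⟩
        simp only
        refine ⟨List.mem_append.mpr (Or.inl hwmem), hcw, ?_⟩
        intro x hx hcx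
        rw [hm_count_append] at hcx
        by_cases hxv : v = x
        · subst hxv
          rw [if_pos rfl] at hcx
          have hnlt : ¬ (v < w) := fun hlt => h2 ⟨by omega, hlt⟩
          omega
        · rw [if_neg hxv] at hcx
          rcases List.mem_append.mp hx with h | h
          · exact hwmin x h (by omega)
          · simp at h; exact absurd (Eq.symm h) hxv

lemma hmInv_foldl (l : List Int) : ∀ (p : List Int) (st : PySem.Dict Int Int × Option Int × Int),
    hmInv p st → hmInv (p ++ l) (l.foldl hmAltStep st) := by
  induction l with
  | nil => intro p st h; simpa using h
  | cons v l ih =>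
    intro p st h
    have h2 := ih (p ++ [v]) (hmAltStep st v) (hmInv_step p st v h)
    simpa using h2

lemma hmInv_data (data : List Int) :
    hmInv data (data.foldl hmAltStep (PySem.Dict.empty, none, 0)) := by
  have h0 : hmInv [] ((PySem.Dict.empty : PySem.Dict Int Int), (none : Option Int), (0 : Int)) := by
    exact ⟨rfl, by simp, by simp⟩
  simpa using hmInv_foldl data [] _ h0

theorem hm_main (data : List Int) (hpre : data ≠ []) :
    hitung_modus data = hitung_modus_alt data := by
  obtain ⟨a, ha⟩ := List.exists_mem_of_ne_nil data hpre
  simp only [hitung_modus, hitung_modus_alt]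
  rw [hm_fold_eq_counter, hm_ifmax_eq_max]
  rw [PySem.Dict.values_eq_map_keys _ (PySem.Dict.nodup_keys_counter data) 0]
  simp only [PySem.Dict.getD_counter, PySem.Dict.keys_counter]
  set S := PySem.Set.ofList data with hS
  set M := (S.map (fun k => (List.count k data : Int))).foldl max 0 with hM
  -- A's maximum frequency: upper bound and attainment
  have hub : ∀ k ∈ S, (List.count k data : Int) ≤ M := by
    intro k hk
    exact (PySem.List.le_foldl_max _ 0).2 _ (List.mem_map_of_mem hk)
  have hattain : ∃ k, k ∈ data ∧ (List.count k data : Int) = M := by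
    rcases PySem.List.foldl_max_mem (S.map (fun k => (List.count k data : Int))) 0 with h0 | hmem
    · exfalso
      have haS : a ∈ S := (PySem.Set.mem_ofList data a).mpr ha
      have := hub a haS
      have hca : 1 ≤ List.count a data := List.one_le_count_iff.mpr ha
      rw [← hM] at h0
      omega
    · rw [← hM] at hmem
      obtain ⟨k, hk, hkeq⟩ := List.mem_map.mp hmem
      exact ⟨k, (PySem.Set.mem_ofList data k).mp hk, hkeq⟩
  -- A's modus list: membership characterization
  rw [PySem.Dict.items_counter, PySem.List.foldl_append_ite (p := fun p => p.2 = M) (f := Prod.fst)]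
  simp only [List.nil_append]
  set L := (List.filter (fun x => decide (x.2 = M)) (S.map (fun k => (k, (List.count k data : Int))))).map Prod.fst with hL
  have hchar : ∀ x, x ∈ L ↔ x ∈ data ∧ (List.count x data : Int) = M := by
    intro x
    rw [hL]
    constructor
    · intro hx
      obtain ⟨q, hq, hqeq⟩ := List.mem_map.mp hx
      obtain ⟨hqmem, hqcond⟩ := List.mem_filter.mp hq
      obtain ⟨k, hkS, hkeq⟩ := List.mem_map.mp hqmem
      subst hqeq
      rw [← hkeq] at hqcond ⊢
      simp only at hqcond ⊢
      exact ⟨(PySem.Set.mem_ofList data k).mp hkS, by simpa using hqcond⟩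
    · intro ⟨hxd, hxc⟩
      apply List.mem_map.mpr
      refine ⟨(x, (List.count x data : Int)), ?_, rfl⟩
      apply List.mem_filter.mpr
      exact ⟨List.mem_map_of_mem ((PySem.Set.mem_ofList data x).mpr hxd), by simpa using hxc⟩
  -- B's streaming loop via its invariant
  obtain ⟨_, hbub, hbmatch⟩ := hmInv_data data
  cases hbopt : (data.foldl hmAltStep (PySem.Dict.empty, none, 0)).2.1 with
  | none =>
    rw [hbopt] at hbmatch
    exact absurd hbmatch.1 hpre
  | some b =>
    rw [hbopt] at hbmatch
    obtain ⟨hbmem, hbcnt, hbmin⟩ := hbmatch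
    -- best_frek = M
    have hbfM : (data.foldl hmAltStep (PySem.Dict.empty, none, 0)).2.2 = M := by
      obtain ⟨k, hk, hkeq⟩ := hattain
      have h1 := hub b ((PySem.Set.mem_ofList data b).mpr hbmem)
      have h2 := hbub k hk
      omega
    -- A's min over L equals b
    cases hm1 : PySem.List.min? L (fun x => x) with
    | none =>
      exfalso
      have hLnil := (PySem.List.min?_eq_none_iff L _).mp hm1
      have : b ∈ L := (hchar b).mpr ⟨hbmem, by omega⟩
      rw [hLnil] at this
      exact absurd this (by simp)
    | some m1 =>
      have hm1mem := (hchar m1).mp (PySem.List.min?_mem hm1)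
      have h1 : m1 ≤ b := PySem.List.min?_isMin hm1 b ((hchar b).mpr ⟨hbmem, by omega⟩)
      have h2 : b ≤ m1 := hbmin m1 hm1mem.1 (by omega)
      simp only [Option.getD_some]
      omega

-- ===== VERDICT (by name: the statement is the Claim_ definition above) =====
theorem hitung_modus_spec : Claim_equal_hitung_modus := by
  intro data _ hpre
  unfold Spec_hitung_modus
  exact hm_main data hpre
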